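-- pv_equiv track=rewrite | github.com/xprikr33/IBT | src/Solitaire/solitaire_get_moves.py | sort_possible_moves
-- ===== SOURCE A (Python) =====
-- STOCK_RET = 12
--
-- def sort_possible_moves(possible_moves):
--     """
--     Seřadí množinu dostupných tahů na základě jejich ohodnocení
--     """
--     sorted_possible_moves = sorted(possible_moves, key=sort_key, reverse=True)
--
--     priority_count = sum(1 for move in sorted_possible_moves if move[0][0] == STOCK_RET)
--
--     #Odstraní tah pro přetočení kartet z waste na stock, pokud je tento tah zbytečný
--     if priority_count == 1:
--         for move in sorted_possible_moves:
--             if move[0][0] == STOCK_RET: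
--                 sorted_possible_moves.remove(move)
--                 break
--
--     return sorted_possible_moves
--
-- def sort_key(move):
--     """
--     Vrací ohodnocení, podle kterého je prováděno seřazování množiny tahů
--     """
--     return -move[0][1]
-- ===== SOURCE B (Python) =====
-- STOCK_RET = 12
--
-- def sort_key(move):
--     return -move[0][1]
--
-- def sort_possible_moves(possible_moves):
--     """Partition the moves in one pass into STOCK_RET moves and the rest; if the
--     STOCK_RET move is unique, sort only the rest (dropping it), otherwise sort
--     everything. Correct because the dropped move is unique, so whether it is
--     removed before or after the sort cannot matter."""
--     stock, rest = [], []
--     for move in possible_moves: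
--         (stock if move[0][0] == STOCK_RET else rest).append(move)
--     if len(stock) == 1:
--         return sorted(rest, key=sort_key, reverse=True)
--     return sorted(possible_moves, key=sort_key, reverse=True)
-- ===== Notes on version B (the rewrite author's own statement) =====
-- stated objective: simpler
-- what changed: B partitions the unsorted input into STOCK_RET moves and the rest in one pass and sorts once (the rest if the STOCK_RET move is unique, everything otherwise), replacing A's sort-then-count-then-scan-and-remove; correct because the removed move is unique, so its pre- vs post-sort position is irrelevant.
import Mathlib
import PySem

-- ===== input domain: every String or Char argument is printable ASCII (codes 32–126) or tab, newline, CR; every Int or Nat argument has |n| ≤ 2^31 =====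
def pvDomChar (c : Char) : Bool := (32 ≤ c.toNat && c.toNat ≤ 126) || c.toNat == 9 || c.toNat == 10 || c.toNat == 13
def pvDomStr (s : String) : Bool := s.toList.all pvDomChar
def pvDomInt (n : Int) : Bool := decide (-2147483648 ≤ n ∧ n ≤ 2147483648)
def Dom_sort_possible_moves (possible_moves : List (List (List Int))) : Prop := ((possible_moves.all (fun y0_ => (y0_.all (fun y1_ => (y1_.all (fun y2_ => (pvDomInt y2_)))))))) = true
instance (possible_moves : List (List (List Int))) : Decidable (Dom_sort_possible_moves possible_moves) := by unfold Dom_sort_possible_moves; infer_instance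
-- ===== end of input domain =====

-- B partitions the input into STOCK_RET moves and the rest in one pass and sorts once,
-- replacing A's sort-then-count-then-scan-and-remove; objective: simpler.

-- shared module constant STOCK_RET and helper sort_key (both Python files contain them verbatim)
def stockRet : Int := 12

-- sort_key(move) = -move[0][1]; exact under Pre_ (indexes in range)
def sortKeyMove (move : List (List Int)) : Int :=
  -(PySem.List.pyGetD (PySem.List.pyGetD move 0 []) 1 0)

-- the test 'move[0][0] == STOCK_RET'; exact under Pre_ (indexes in range)
def isStockRet (move : List (List Int)) : Bool :=
  PySem.List.pyGetD (PySem.List.pyGetD move 0 []) 0 0 == stockRet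

-- ===== PORT A =====
-- the for/remove/break loop removes the first list element equal to the first move
-- satisfying the test; exact as find? + erase (.remove drops the first equal element)
def sort_possible_moves (possible_moves : List (List (List Int))) : List (List (List Int)) :=
  let sorted_possible_moves := PySem.List.sorted possible_moves sortKeyMove true
  let priority_count : Int :=
    sorted_possible_moves.foldl (fun acc move => if isStockRet move then acc + 1 else acc) 0
  if priority_count = 1 then
    match sorted_possible_moves.find? isStockRet with
    | some move => sorted_possible_moves.erase move
    | none => sorted_possible_moves
  else sorted_possible_moves

-- ===== PORT B =====
-- B's single-pass partition loop, as structural recursion (appends keep order,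
-- so building front-to-back by recursion is exact)
def partStock : List (List (List Int)) → List (List (List Int)) × List (List (List Int))
  | [] => ([], [])
  | move :: ms =>
    let (s, r) := partStock ms
    if isStockRet move then (move :: s, r) else (s, move :: r)

def sort_possible_moves_alt (possible_moves : List (List (List Int))) : List (List (List Int)) :=
  match partStock possible_moves with
  | ([_], rest) => PySem.List.sorted rest sortKeyMove true
  | _ => PySem.List.sorted possible_moves sortKeyMove true

-- ===== PRECONDITION & SPEC =====
-- Python raises IndexError on any empty move and on any move whose first part has fewer than two entries (sort_key reads move[0][1])
def Pre_sort_possible_moves (possible_moves : List (List (List Int))) : Prop :=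
  ∀ m ∈ possible_moves, 2 ≤ (m.getD 0 []).length

instance (possible_moves : List (List (List Int))) : Decidable (Pre_sort_possible_moves possible_moves) := by
  unfold Pre_sort_possible_moves; infer_instance

def pvWitness_sort_possible_moves : List (List (List Int)) :=
  [[[12, 5]], [[3, 2], [7]], [[3, 4]]]

def Spec_sort_possible_moves (possible_moves : List (List (List Int))) (out : List (List (List Int))) : Prop := out = sort_possible_moves_alt possible_moves
instance (possible_moves : List (List (List Int))) (out : List (List (List Int))) : Decidable (Spec_sort_possible_moves possible_moves out) := by unfold Spec_sort_possible_moves; infer_instance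

-- ===== CLAIM (what is proved, stated in full; the proofs are below) =====
def Claim_equal_sort_possible_moves : Prop := ∀ (possible_moves : List (List (List Int))), Dom_sort_possible_moves possible_moves → Pre_sort_possible_moves possible_moves → Spec_sort_possible_moves possible_moves (sort_possible_moves possible_moves)

-- ===== LEMMAS AND PROOFS =====

-- the partition's two components are the two filters
theorem partStock_eq_filters (pm : List (List (List Int))) :
    partStock pm = (pm.filter isStockRet, pm.filter (fun m => !isStockRet m)) := by
  induction pm with
  | nil => rfl
  | cons m ms ih =>
    by_cases h : isStockRet m <;>
      simp [partStock, ih, List.filter_cons, h]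

-- if x goes before every element of l, insertBy puts it in front
theorem insertBy_front {α : Type} (before : α → α → Bool) (x : α) (l : List α)
    (h : ∀ z ∈ l, before x z = true) :
    PySem.List.insertBy before x l = x :: l := by
  cases l with
  | nil => rfl
  | cons y ys =>
    simp [PySem.List.insertBy, h y (by simp)]

-- insertion keeps the accumulator sorted (descending in the key)
theorem pairwise_insertBy {α : Type} (key : α → Int) (x : α)
    (ys : List α) (h : ys.Pairwise (fun a b => key b ≤ key a)) :
    (PySem.List.insertBy (fun a b => decide (key b < key a)) x ys).Pairwise
      (fun a b => key b ≤ key a) := by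
  induction ys with
  | nil => simp [PySem.List.insertBy]
  | cons y ys ih =>
    rcases List.pairwise_cons.mp h with ⟨hy, hys⟩
    by_cases hb : key y < key x
    · simp only [PySem.List.insertBy, decide_eq_true_eq, if_pos hb]
      refine List.pairwise_cons.mpr ⟨?_, h⟩
      intro z hz
      rcases List.mem_cons.mp hz with rfl | h2
      · omega
      · have := hy z h2; omega
    · simp only [PySem.List.insertBy, decide_eq_true_eq, if_neg hb]
      refine List.pairwise_cons.mpr ⟨?_, ih hys⟩
      intro z hz
      rcases (PySem.List.mem_insertBy _ x z ys).mp hz with rfl | h2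
      · omega
      · exact hy z h2

-- filtering commutes with inserting into a sorted-descending accumulator
theorem filter_insertBy {α : Type} (key : α → Int) (q : α → Bool)
    (x : α) (ys : List α)
    (h : ys.Pairwise (fun a b => key b ≤ key a)) :
    (PySem.List.insertBy (fun a b => decide (key b < key a)) x ys).filter q =
      if q x then PySem.List.insertBy (fun a b => decide (key b < key a)) x (ys.filter q)
      else ys.filter q := by
  induction ys with
  | nil =>
    by_cases hq : q x <;> simp [PySem.List.insertBy, hq]
  | cons y ys ih =>
    rcases List.pairwise_cons.mp h with ⟨hy, hys⟩
    by_cases hb : key y < key x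
    · simp only [PySem.List.insertBy, decide_eq_true_eq, if_pos hb]
      by_cases hq : q x
      · by_cases hqy : q y
        · simp [List.filter_cons, hq, hqy, PySem.List.insertBy, hb]
        · have hfront : PySem.List.insertBy (fun a b => decide (key b < key a)) x
              (List.filter q ys) = x :: List.filter q ys := by
            apply insertBy_front
            intro z hz
            have := hy z (List.mem_of_mem_filter hz)
            simp only [decide_eq_true_eq]; omega
          simp [List.filter_cons, hq, hqy, hfront]
      · simp [List.filter_cons, hq]
    · simp only [PySem.List.insertBy, decide_eq_true_eq, if_neg hb]
      by_cases hqy : q y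
      · simp only [List.filter_cons, hqy, if_pos]
        rw [ih hys]
        by_cases hq : q x
        · simp [hq, PySem.List.insertBy, hb]
        · simp [hq]
      · simp only [List.filter_cons, hqy, Bool.false_eq_true, if_false]
        exact ih hys

-- filter commutes with the whole insertion fold
theorem filter_foldl_insertBy {α : Type} (key : α → Int) (q : α → Bool)
    (xs acc : List α) (h : acc.Pairwise (fun a b => key b ≤ key a)) :
    (xs.foldl (fun acc x => PySem.List.insertBy (fun a b => decide (key b < key a)) x acc) acc).filter q =
      (xs.filter q).foldl (fun acc x => PySem.List.insertBy (fun a b => decide (key b < key a)) x acc)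
        (acc.filter q) := by
  induction xs generalizing acc with
  | nil => simp
  | cons x xs ih =>
    simp only [List.foldl_cons, List.filter_cons]
    rw [ih _ (pairwise_insertBy key x acc h), filter_insertBy key q x acc h]
    by_cases hq : q x <;> simp [hq]

-- filter before a reverse stable sort = filter after it
theorem sorted_rev_filter {α : Type} (key : α → Int) (q : α → Bool)
    (xs : List α) :
    (PySem.List.sorted xs key true).filter q = PySem.List.sorted (xs.filter q) key true := by
  rw [PySem.List.sorted_rev_eq_foldl_insertBy, PySem.List.sorted_rev_eq_foldl_insertBy]
  simpa using filter_foldl_insertBy key q xs [] (by simp)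

-- erasing the first move found by the test = filtering it out, when the test holds exactly once
theorem erase_find_eq_filter {α : Type} [BEq α] [LawfulBEq α] (p : α → Bool) :
    ∀ (s : List α) (u : α), s.find? p = some u → s.countP p = 1 →
      s.erase u = s.filter (fun x => !p x) := by
  intro s
  induction s with
  | nil => intro u hu; simp at hu
  | cons x s ih =>
    intro u hu hc
    by_cases hx : p x
    · rw [List.find?_cons_of_pos hx] at hu
      injection hu with hu; subst hu
      simp [hx] at hc
      simp only [List.erase_cons_head, List.filter_cons, hx, Bool.not_true,
        Bool.false_eq_true, if_false]
      exact (List.filter_eq_self.mpr (by intro a ha; simp [hc a ha])).symm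
    · rw [List.find?_cons_of_neg hx] at hu
      have hc1 : s.countP p = 1 := by
        simp [hx] at hc; omega
      have hpu : p u = true := List.find?_some hu
      have hne : ¬ (x == u) = true := by
        intro he; rw [eq_of_beq he] at hx; exact hx hpu
      rw [List.erase_cons_tail hne]
      simp only [List.filter_cons, hx, Bool.not_false, if_pos]
      rw [ih u hu hc1]

-- B's match fires exactly when the filter of STOCK_RET moves is a singleton
theorem alt_cases (pm : List (List (List Int))) :
    sort_possible_moves_alt pm =
      if (pm.filter isStockRet).length = 1
      then PySem.List.sorted (pm.filter (fun m => !isStockRet m)) sortKeyMove true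
      else PySem.List.sorted pm sortKeyMove true := by
  unfold sort_possible_moves_alt
  rw [partStock_eq_filters]
  rcases hf : pm.filter isStockRet with _ | ⟨a, _ | ⟨b, t⟩⟩ <;> simp

-- ===== VERDICT (by name: the statement is the Claim_ definition above) =====
theorem sort_possible_moves_spec : Claim_equal_sort_possible_moves := by
  intro pm _ _
  unfold Spec_sort_possible_moves sort_possible_moves
  rw [alt_cases]
  simp only [PySem.List.foldl_count_if]
  have hperm : (PySem.List.sorted pm sortKeyMove true).Perm pm :=
    PySem.List.sorted_perm pm sortKeyMove true
  have hcnt : (PySem.List.sorted pm sortKeyMove true).countP isStockRet = pm.countP isStockRet :=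
    hperm.countP_eq isStockRet
  rw [hcnt]
  have hlen : (pm.filter isStockRet).length = pm.countP isStockRet := by
    simp [List.countP_eq_length_filter]
  by_cases h1 : pm.countP isStockRet = 1
  · have hi : (0 : Int) + (pm.countP isStockRet : Int) = 1 := by omega
    rw [if_pos hi, if_pos (by omega)]
    have hcs : (PySem.List.sorted pm sortKeyMove true).countP isStockRet = 1 := by
      rw [hcnt]; exact h1
    have hex : ∃ u ∈ PySem.List.sorted pm sortKeyMove true, isStockRet u = true := by
      by_contra hno
      push_neg at hno
      have : (PySem.List.sorted pm sortKeyMove true).countP isStockRet = 0 :=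
        List.countP_eq_zero.mpr (by intro a ha; simp [hno a ha])
      omega
    rcases Option.isSome_iff_exists.mp (List.find?_isSome.mpr hex) with ⟨u, hu⟩
    simp only [hu]
    rw [erase_find_eq_filter isStockRet _ u hu hcs, sorted_rev_filter]
  · have hi : ¬ ((0 : Int) + (pm.countP isStockRet : Int) = 1) := by omega
    rw [if_neg hi, if_neg (by omega)]
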